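-- pv_equiv track=rewrite | github.com/1nnokent/hahatone | algorithms.py | find_nearest_time
-- ===== SOURCE A (Python) =====
-- first_tour_times = [120, 150, 180, 190, 200, 220, 240, 260, 280, 295, 300]
--
-- second_tour_times = [30, 45, 75, 90, 95, 105, 120, 135, 150, 165, 180, 195, 210, 225, 240, 255, 270, 280, 290, 295, 300]
--
-- def find_nearest_time(time, tour):
--     answ = 0
--     if tour == 1:
--         for elem in first_tour_times:
--             if elem <= time:
--                 answ = elem
--     elif tour == 2:
--         for elem in second_tour_times:
--             if elem <= time:
--                 answ = elem
--     return answ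
-- ===== SOURCE B (Python) =====
-- from bisect import bisect_right
--
-- first_tour_times = [120, 150, 180, 190, 200, 220, 240, 260, 280, 295, 300]
--
-- second_tour_times = [30, 45, 75, 90, 95, 105, 120, 135, 150, 165, 180, 195, 210, 225, 240, 255, 270, 280, 290, 295, 300]
--
-- def find_nearest_time(time, tour):
--     if tour == 1:
--         lst = first_tour_times
--     elif tour == 2:
--         lst = second_tour_times
--     else:
--         return 0
--     i = bisect_right(lst, time)
--     return lst[i - 1] if i > 0 else 0
-- ===== Notes on version B (the rewrite author's own statement) =====
-- stated objective: idiomatic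
-- what changed: Replaces the linear last-match accumulation scan with bisect_right binary search on the sorted preset list, returning the predecessor element.
import Mathlib
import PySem

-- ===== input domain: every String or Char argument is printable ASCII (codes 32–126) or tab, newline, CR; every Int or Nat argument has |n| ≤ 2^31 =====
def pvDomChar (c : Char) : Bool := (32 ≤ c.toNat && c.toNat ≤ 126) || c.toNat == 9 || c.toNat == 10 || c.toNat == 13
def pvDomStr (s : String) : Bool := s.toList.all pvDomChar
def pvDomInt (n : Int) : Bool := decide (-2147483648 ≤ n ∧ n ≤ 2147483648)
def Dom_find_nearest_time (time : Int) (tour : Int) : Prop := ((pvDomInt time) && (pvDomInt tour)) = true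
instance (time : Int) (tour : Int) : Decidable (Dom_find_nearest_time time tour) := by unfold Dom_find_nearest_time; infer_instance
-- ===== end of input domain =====

-- B replaces A's linear last-match scan with a bisect_right binary search on the sorted preset list.

-- ===== PORT A =====
def first_tour_times : List Int := [120, 150, 180, 190, 200, 220, 240, 260, 280, 295, 300]

def second_tour_times : List Int := [30, 45, 75, 90, 95, 105, 120, 135, 150, 165, 180, 195, 210, 225, 240, 255, 270, 280, 290, 295, 300]

def find_nearest_time (time : Int) (tour : Int) : Int :=
  let answ : Int := 0
  if tour = 1 then
    first_tour_times.foldl (fun answ elem => if elem ≤ time then elem else answ) answ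
  else if tour = 2 then
    second_tour_times.foldl (fun answ elem => if elem ≤ time then elem else answ) answ
  else
    answ

-- ===== PORT B =====
-- transliteration of Python's bisect.bisect_right loop: while lo < hi: mid=(lo+hi)//2; if x < a[mid]: hi=mid else lo=mid+1
-- (the getD default 0 is never read: mid < hi ≤ xs.length on every call)
def bisectRight (xs : List Int) (x : Int) (lo hi : Nat) : Nat :=
  if _h : lo < hi then
    let mid := (lo + hi) / 2
    if x < xs.getD mid 0 then bisectRight xs x lo mid
    else bisectRight xs x (mid + 1) hi
  else lo
termination_by hi - lo
decreasing_by all_goals omega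

def find_nearest_time_alt (time : Int) (tour : Int) : Int :=
  if tour = 1 then
    let lst := first_tour_times
    let i := bisectRight lst time 0 lst.length
    if i > 0 then lst.getD (i - 1) 0 else 0
  else if tour = 2 then
    let lst := second_tour_times
    let i := bisectRight lst time 0 lst.length
    if i > 0 then lst.getD (i - 1) 0 else 0
  else 0

-- ===== PRECONDITION & SPEC =====
def Spec_find_nearest_time (time : Int) (tour : Int) (out : Int) : Prop := out = find_nearest_time_alt time tour
instance (time : Int) (tour : Int) (out : Int) : Decidable (Spec_find_nearest_time time tour out) := by unfold Spec_find_nearest_time; infer_instance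

-- ===== CLAIM (what is proved, stated in full; the proofs are below) =====
def Claim_equal_find_nearest_time : Prop := ∀ (time : Int) (tour : Int), Dom_find_nearest_time time tour → Spec_find_nearest_time time tour (find_nearest_time time tour)

-- ===== LEMMAS AND PROOFS =====

-- bisect_right invariant: the result r splits the (sorted) slice so that everything
-- before r is ≤ x and everything from r on is > x.
theorem bisect_inv (xs : List Int) (x : Int)
    (mono : ∀ i j : Nat, i ≤ j → j < xs.length → xs.getD i 0 ≤ xs.getD j 0) :
    ∀ (d lo hi : Nat), hi - lo ≤ d → lo ≤ hi → hi ≤ xs.length →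
    (∀ i, i < lo → xs.getD i 0 ≤ x) →
    (∀ i, hi ≤ i → i < xs.length → x < xs.getD i 0) →
    lo ≤ bisectRight xs x lo hi ∧ bisectRight xs x lo hi ≤ hi ∧
    (∀ i, i < bisectRight xs x lo hi → xs.getD i 0 ≤ x) ∧
    (∀ i, bisectRight xs x lo hi ≤ i → i < xs.length → x < xs.getD i 0) := by
  intro d
  induction d with
  | zero =>
    intro lo hi h1 h2 h3 hlo hhi
    have hn : ¬ lo < hi := by omega
    rw [bisectRight]
    simp only [hn, dite_false]
    exact ⟨le_refl _, by omega, fun i hi' => hlo i hi', fun i hi' hl => hhi i (by omega) hl⟩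
  | succ d ih =>
    intro lo hi h1 h2 h3 hlo hhi
    by_cases hlh : lo < hi
    · rw [bisectRight]
      rw [dif_pos hlh]
      by_cases hc : x < xs.getD ((lo + hi) / 2) 0
      · rw [if_pos hc]
        have hmidlt : (lo + hi) / 2 < hi := by omega
        have h := ih lo ((lo + hi) / 2) (by omega) (by omega) (by omega) hlo
          (fun i hmi hil => lt_of_lt_of_le hc (mono _ i hmi hil))
        exact ⟨h.1, by omega, h.2.2.1, h.2.2.2⟩
      · rw [if_neg hc]
        push_neg at hc
        have hmidlt : (lo + hi) / 2 < hi := by omega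
        have hmidlen : (lo + hi) / 2 < xs.length := by omega
        have h := ih ((lo + hi) / 2 + 1) hi (by omega) (by omega) h3
          (fun i hi' => by
            by_cases hil : i < lo
            · exact hlo i hil
            · exact le_trans (mono i ((lo + hi) / 2) (by omega) hmidlen) hc)
          hhi
        exact ⟨by omega, h.2.1, h.2.2.1, h.2.2.2⟩
    · rw [bisectRight]
      simp only [hlh, dite_false]
      exact ⟨le_refl _, by omega, fun i hi' => hlo i hi', fun i hi' hl => hhi i (by omega) hl⟩

-- A's accumulate-last-match scan = last element of the filtered list (default a)
theorem fold_filter (x : Int) :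
    ∀ (xs : List Int) (a : Int),
      xs.foldl (fun answ elem => if elem ≤ x then elem else answ) a
        = (xs.filter (fun e => decide (e ≤ x))).getLastD a := by
  intro xs
  induction xs with
  | nil => intro a; simp
  | cons e xs ih =>
    intro a
    simp only [List.foldl_cons, List.filter_cons]
    by_cases h : e ≤ x
    · simp only [h, if_pos, decide_true]
      rw [ih e, List.getLastD_cons]
    · simp only [h, decide_false, Bool.false_eq_true, if_false]
      rw [ih a]

-- when the true positions of p form exactly the prefix [0, r), filter = take r
theorem filter_eq_take (p : Int → Bool) :
    ∀ (xs : List Int) (r : Nat), r ≤ xs.length →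
      (∀ i, i < xs.length → (p (xs.getD i 0) = true ↔ i < r)) →
      xs.filter p = xs.take r := by
  intro xs
  induction xs with
  | nil => intro r h _; simp at h; simp [h]
  | cons e xs ih =>
    intro r hr hspec
    cases r with
    | zero =>
      have he : p e = false := by
        have := hspec 0 (by simp)
        simp at this; simpa using this
      simp only [List.filter_cons, he, Bool.false_eq_true, if_false, List.take_zero]
      exact ih 0 (by omega) (fun i hi => by
        have := hspec (i+1) (by simp; omega)
        simpa using this)
    | succ s =>
      have he : p e = true := by
        have := hspec 0 (by simp)
        simpa using this.mpr (by omega)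
      simp only [List.filter_cons, he, if_true, List.take_succ_cons]
      congr 1
      exact ih s (by simp at hr; omega) (fun i hi => by
        have := hspec (i+1) (by simp; omega)
        simp at this
        exact this)

theorem take_getLastD :
    ∀ (xs : List Int) (r : Nat) (a : Int), r ≤ xs.length →
      (xs.take r).getLastD a = if r > 0 then xs.getD (r-1) 0 else a := by
  intro xs
  induction xs with
  | nil => intro r a h; simp at h; simp [h]
  | cons e xs ih =>
    intro r a hr
    cases r with
    | zero => simp
    | succ s =>
      simp only [List.take_succ_cons, List.getLastD_cons]
      rw [ih s e (by simp at hr; omega)]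
      cases s with
      | zero => simp
      | succ t => simp

-- sortedness gives the monotone-getD hypothesis of bisect_inv
theorem sorted_mono (xs : List Int) (hs : xs.Pairwise (· ≤ ·)) :
    ∀ i j : Nat, i ≤ j → j < xs.length → xs.getD i 0 ≤ xs.getD j 0 := by
  intro i j hij hj
  have hi : i < xs.length := lt_of_le_of_lt hij hj
  rw [List.getD_eq_getElem xs 0 hi, List.getD_eq_getElem xs 0 hj]
  rcases eq_or_lt_of_le hij with h | h
  · subst h; exact le_refl _
  · exact (List.pairwise_iff_getElem.mp hs) i j hi hj h

-- the heart of the equivalence: on any sorted list, A's scan = B's bisect lookup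
theorem scan_eq_bisect (xs : List Int) (x : Int) (hs : xs.Pairwise (· ≤ ·)) :
    xs.foldl (fun answ elem => if elem ≤ x then elem else answ) 0 =
      (if bisectRight xs x 0 xs.length > 0
       then xs.getD (bisectRight xs x 0 xs.length - 1) 0 else 0) := by
  have mono := sorted_mono xs hs
  have inv := bisect_inv xs x mono xs.length 0 xs.length (by omega) (by omega) (le_refl _)
    (fun i hi => by omega) (fun i hi hl => by omega)
  set r := bisectRight xs x 0 xs.length with hr
  have hrlen : r ≤ xs.length := inv.2.1
  have hspec : ∀ i, i < xs.length →
      ((fun e => decide (e ≤ x)) (xs.getD i 0) = true ↔ i < r) := by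
    intro i hi
    constructor
    · intro h
      by_contra hn
      have hgt := inv.2.2.2 i (by omega) hi
      have h' : xs.getD i 0 ≤ x := of_decide_eq_true h
      omega
    · intro h
      exact decide_eq_true (inv.2.2.1 i h)
  rw [fold_filter, filter_eq_take _ xs r hrlen hspec, take_getLastD xs r 0 hrlen]

theorem sorted_first : first_tour_times.Pairwise (· ≤ ·) := by decide
theorem sorted_second : second_tour_times.Pairwise (· ≤ ·) := by decide

-- ===== VERDICT (by name: the statement is the Claim_ definition above) =====
theorem find_nearest_time_spec : Claim_equal_find_nearest_time := by
  intro time tour _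
  unfold Spec_find_nearest_time find_nearest_time find_nearest_time_alt
  by_cases h1 : tour = 1
  · simp only [h1, if_true]
    exact scan_eq_bisect first_tour_times time sorted_first
  · by_cases h2 : tour = 2
    · simp only [h1, h2, if_false, if_true]
      exact scan_eq_bisect second_tour_times time sorted_second
    · simp [h1, h2]
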